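-- pv_equiv track=rewrite | github.com/sanbobsan/hw-python | hw 7 files/task.py | group_roles
-- ===== SOURCE A (Python) =====
-- def group_roles(roles, textLines):
--     role_lines = {}
--
--     for i, line in enumerate(textLines, 1):
--         if ":" not in line:
--             continue
--         role, text = line.split(":", 1)
--         text = text.lstrip()
--         if role not in role_lines:
--             role_lines[role] = []
--         role_lines[role].append((i, text))
--
--     result = []
--     for idx, role in enumerate(roles):
--         result.append(role + ":")
--         if role in role_lines:
--             for num, txt in role_lines[role]:
--                 result.append(f"{num}) {txt}")
--         if idx < len(roles) - 1:
--             result.append("")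
--
--     return "\n".join(result)
-- ===== SOURCE B (Python) =====
-- def group_roles(roles, textLines):
--     blocks = []
--     for role in roles:
--         block = [role + ":"]
--         for num, line in enumerate(textLines, 1):
--             if ":" in line:
--                 prefix, text = line.split(":", 1)
--                 if prefix == role:
--                     block.append(f"{num}) {text.lstrip()}")
--         blocks.append("\n".join(block))
--     return "\n\n".join(blocks)
-- ===== Notes on version B (the rewrite author's own statement) =====
-- stated objective: simpler
-- what changed: Replaces the build-a-dict-of-role-lines-then-look-up structure with a direct per-role scan: for each role in order, scan the enumerated lines once collecting matching formatted entries into that role's block, then join blocks with a blank line.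
import Mathlib
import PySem

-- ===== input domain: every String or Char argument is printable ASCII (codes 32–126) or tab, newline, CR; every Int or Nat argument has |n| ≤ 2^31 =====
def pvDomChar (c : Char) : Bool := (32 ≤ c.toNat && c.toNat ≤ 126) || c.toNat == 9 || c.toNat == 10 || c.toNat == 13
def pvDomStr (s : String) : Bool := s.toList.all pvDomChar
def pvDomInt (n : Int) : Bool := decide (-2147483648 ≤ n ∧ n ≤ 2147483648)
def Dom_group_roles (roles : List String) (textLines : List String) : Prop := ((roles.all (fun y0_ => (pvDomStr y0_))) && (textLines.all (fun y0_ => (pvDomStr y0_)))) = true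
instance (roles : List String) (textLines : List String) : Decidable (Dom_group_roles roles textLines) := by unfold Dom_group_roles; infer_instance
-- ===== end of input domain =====

-- B replaces A's build-a-dict-then-look-up structure with a direct per-role rescan of the lines; same output, simpler shape.

-- ===== PORT A =====
-- literal transliteration of A: build the role_lines dict over enumerate(textLines, 1), then emit blocks
def group_roles (roles : List String) (textLines : List String) : String :=
  let role_lines : PySem.Dict String (List (Int × String)) :=
    (PySem.List.enumerate textLines 1).foldl (fun d p =>
      if PySem.Str.isIn ":" p.2 then
        match PySem.Str.splitMax? p.2 ":" 1 with
        | some (role :: text :: _) =>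
            d.modify role [] (· ++ [(p.1, PySem.Str.lstrip text)])
        | _ => d   -- unreachable: split of a line containing ":" yields at least two parts
      else d) PySem.Dict.empty
  let result : List String :=
    (PySem.List.enumerate roles).foldl (fun r p =>
      let r := r ++ [p.2 ++ ":"]
      let r := if role_lines.contains p.2 then
          r ++ (role_lines.getD p.2 []).map (fun q => PySem.Int.toStr q.1 ++ ") " ++ q.2)
        else r
      if p.1 < (roles.length : Int) - 1 then r ++ [""] else r) []
  PySem.Str.join "\n" result

-- ===== PORT B =====
-- literal transliteration of B: for each role, rescan enumerate(textLines, 1); blocks joined by "\n\n"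
def group_roles_alt (roles : List String) (textLines : List String) : String :=
  let blocks : List String := roles.map (fun role =>
    PySem.Str.join "\n" ((PySem.List.enumerate textLines 1).foldl (fun block p =>
      if PySem.Str.isIn ":" p.2 then
        match PySem.Str.splitMax? p.2 ":" 1 with
        | none => block
        | some [] => block
        | some [_] => block
        | some (pre :: text :: _) =>
            if pre == role then
              block ++ [PySem.Int.toStr p.1 ++ ") " ++ PySem.Str.lstrip text]
            else block
      else block) [role ++ ":"]))
  PySem.Str.join "\n\n" blocks

-- ===== PRECONDITION & SPEC =====
def Spec_group_roles (roles : List String) (textLines : List String) (out : String) : Prop := out = group_roles_alt roles textLines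
instance (roles : List String) (textLines : List String) (out : String) : Decidable (Spec_group_roles roles textLines out) := by unfold Spec_group_roles; infer_instance

-- ===== CLAIM (what is proved, stated in full; the proofs are below) =====
def Claim_equal_group_roles : Prop := ∀ (roles : List String) (textLines : List String), Dom_group_roles roles textLines → Spec_group_roles roles textLines (group_roles roles textLines)

-- ===== LEMMAS AND PROOFS =====

-- the (role, (number, lstripped text)) a line contributes, if any
def lineEntry (p : Int × String) : Option (String × (Int × String)) :=
  if PySem.Str.isIn ":" p.2 then
    match PySem.Str.splitMax? p.2 ":" 1 with
    | some (role :: text :: _) => some (role, (p.1, PySem.Str.lstrip text))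
    | _ => none
  else none

def fmtEntry (q : Int × String) : String := PySem.Int.toStr q.1 ++ ") " ++ q.2

def entriesFor (textLines : List String) (r : String) : List (Int × String) :=
  (((PySem.List.enumerate textLines 1).filterMap lineEntry).filter (fun p => p.1 == r)).map (·.2)

def blockFor (textLines : List String) (r : String) : List String :=
  (r ++ ":") :: (entriesFor textLines r).map fmtEntry

-- the list with sep inserted between consecutive elements (not after the last)
def glueSep {α : Type} (sep : α) : List (List α) → List α
  | [] => []
  | [b] => b
  | b :: bs => b ++ [sep] ++ glueSep sep bs

-- a fold whose body acts only through an optional projection is a fold over the filterMap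
theorem foldl_optionStep {α β σ : Type} (f : α → Option β) (g : σ → β → σ) :
    ∀ (l : List α) (s : σ),
      l.foldl (fun s x => (f x).elim s (g s)) s
        = (l.filterMap f).foldl g s := by
  intro l
  induction l with
  | nil => intro s; rfl
  | cons x t ih =>
    intro s
    cases h : f x <;> simp [h, ih]

theorem filterMap_optionStep {α β γ : Type} (f : α → Option β) (pred : β → Bool) (g : β → γ) :
    ∀ (l : List α),
      l.filterMap (fun x => (f x).bind (fun y => if pred y then some (g y) else none))
        = ((l.filterMap f).filter pred).map g := by
  intro l
  induction l with
  | nil => rfl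
  | cons x t ih =>
    cases h : f x with
    | none => simp [h, ih]
    | some y => by_cases hp : pred y <;> simp [h, hp, ih]

theorem dict_fold_eq (textLines : List String) (r : String) :
    ((PySem.List.enumerate textLines 1).foldl (fun d p =>
      if PySem.Str.isIn ":" p.2 then
        match PySem.Str.splitMax? p.2 ":" 1 with
        | some (role :: text :: _) =>
            d.modify role [] (· ++ [(p.1, PySem.Str.lstrip text)])
        | _ => d
      else d) (PySem.Dict.empty : PySem.Dict String (List (Int × String)))).getD r []
      = entriesFor textLines r := by
  have hbody : (fun (d : PySem.Dict String (List (Int × String))) (p : Int × String) =>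
      if PySem.Str.isIn ":" p.2 then
        match PySem.Str.splitMax? p.2 ":" 1 with
        | some (role :: text :: _) =>
            d.modify role [] (· ++ [(p.1, PySem.Str.lstrip text)])
        | _ => d
      else d)
      = (fun d p => (lineEntry p).elim d (fun kv => d.modify kv.1 [] (· ++ [kv.2]))) := by
    funext d p
    unfold lineEntry
    split
    · split <;> rfl
    · rfl
  have hstep := foldl_optionStep lineEntry
    (fun (d : PySem.Dict String (List (Int × String))) kv => d.modify kv.1 [] (· ++ [kv.2]))
    (PySem.List.enumerate textLines 1) PySem.Dict.empty
  rw [hbody, hstep, PySem.Dict.getD_foldl_modify_append]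
  have hempty : (PySem.Dict.empty : PySem.Dict String (List (Int × String))).getD r [] = [] := by
    rfl
  rw [hempty, entriesFor]
  simp

theorem inner_fold_eq (textLines : List String) (role : String) (acc : List String) :
    (PySem.List.enumerate textLines 1).foldl (fun block p =>
      if PySem.Str.isIn ":" p.2 then
        match PySem.Str.splitMax? p.2 ":" 1 with
        | none => block
        | some [] => block
        | some [_] => block
        | some (pre :: text :: _) =>
            if pre == role then
              block ++ [PySem.Int.toStr p.1 ++ ") " ++ PySem.Str.lstrip text]
            else block
      else block) acc
      = acc ++ (entriesFor textLines role).map fmtEntry := by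
  have hbody : (fun (block : List String) (p : Int × String) =>
      if PySem.Str.isIn ":" p.2 then
        match PySem.Str.splitMax? p.2 ":" 1 with
        | none => block
        | some [] => block
        | some [_] => block
        | some (pre :: text :: _) =>
            if pre == role then
              block ++ [PySem.Int.toStr p.1 ++ ") " ++ PySem.Str.lstrip text]
            else block
      else block)
      = (fun block p => ((lineEntry p).bind (fun kv => if kv.1 == role then some (fmtEntry kv.2) else none)).elim block (fun y => block ++ [y])) := by
    funext block p
    unfold lineEntry fmtEntry
    split
    · split
      · rename_i heq
        simp [heq, Option.bind]
      · rename_i heq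
        simp [heq, Option.bind]
      · rename_i heq
        simp [heq, Option.bind]
      · rename_i heq
        split <;> rename_i hb <;> simp only [beq_iff_eq] at hb <;> simp [heq, Option.bind, hb]
    · rfl
  have hstep := foldl_optionStep
    (fun p => (lineEntry p).bind (fun kv => if kv.1 == role then some (fmtEntry kv.2) else none))
    (fun (a : List String) y => a ++ [y]) (PySem.List.enumerate textLines 1) acc
  rw [hbody, hstep,
    filterMap_optionStep lineEntry (fun kv => kv.1 == role) (fun kv => fmtEntry kv.2),
    PySem.List.foldl_append_singleton]
  simp [entriesFor]

theorem outerA (tx : List String) (n : Int) (D : PySem.Dict String (List (Int × String)))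
    (hD : ∀ r, D.getD r [] = entriesFor tx r) :
    ∀ (l : List String) (start : Int) (acc : List String), start + l.length = n →
    List.foldl (fun r p =>
      if p.1 < n - 1 then
        (if D.contains p.2 = true then
            r ++ [p.2 ++ ":"] ++ (D.getD p.2 []).map (fun q => PySem.Int.toStr q.1 ++ ") " ++ q.2)
          else r ++ [p.2 ++ ":"]) ++ [""]
      else
        (if D.contains p.2 = true then
            r ++ [p.2 ++ ":"] ++ (D.getD p.2 []).map (fun q => PySem.Int.toStr q.1 ++ ") " ++ q.2)
          else r ++ [p.2 ++ ":"])) acc (PySem.List.enumerate l start)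
      = acc ++ glueSep "" (l.map (blockFor tx)) := by
  intro l
  induction l with
  | nil => intro start acc _; simp [PySem.List.enumerate, glueSep]
  | cons x t ih =>
    intro start acc hn
    have hstep : (if D.contains x = true then
          acc ++ [x ++ ":"] ++ (D.getD x []).map (fun q => PySem.Int.toStr q.1 ++ ") " ++ q.2)
        else acc ++ [x ++ ":"]) = acc ++ blockFor tx x := by
      by_cases hc : D.contains x = true
      · simp [hc, hD x, blockFor, fmtEntry]
      · have h0 : D.getD x [] = [] := PySem.Dict.getD_of_not_contains D [] (by simpa using hc)
        have h1 : entriesFor tx x = [] := by rw [← hD x, h0]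
        simp [hc, blockFor, h1]
    cases t with
    | nil =>
      have hcond : ¬ (start < n - 1) := by simp at hn; omega
      have henum : PySem.List.enumerate [x] start = [(start, x)] := rfl
      rw [henum, List.foldl_cons, List.foldl_nil]
      simp only [hcond, if_false]
      simpa [glueSep] using hstep
    | cons y u =>
      have hcond : start < n - 1 := by simp at hn; omega
      have henum : PySem.List.enumerate (x :: y :: u) start
          = (start, x) :: PySem.List.enumerate (y :: u) (start + 1) := rfl
      rw [henum, List.foldl_cons,
        ih (start + 1) _ (by simp at hn ⊢; omega)]
      simp only [hcond, if_true, hstep]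
      simp [glueSep, List.append_assoc]

theorem glueSep_map {α β : Type} (f : α → β) (sep : α) :
    ∀ (bs : List (List α)), (glueSep sep bs).map f = glueSep (f sep) (bs.map (List.map f)) := by
  intro bs
  induction bs with
  | nil => rfl
  | cons b t ih =>
    cases t with
    | nil => rfl
    | cons c u => simp [glueSep, ih]

theorem glueSep_ne_nil {α : Type} (sep : α) :
    ∀ (bs : List (List α)), bs ≠ [] → (∀ b ∈ bs, b ≠ []) → glueSep sep bs ≠ [] := by
  intro bs
  cases bs with
  | nil => intro h; exact absurd rfl h
  | cons b t =>
    intro _ h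
    cases t with
    | nil => exact h b (by simp)
    | cons c u =>
      have hb := h b (by simp)
      simp [glueSep]

theorem chars_join_append (sep : List Char) :
    ∀ (xs ys : List (List Char)), xs ≠ [] → ys ≠ [] →
      PySem.Chars.join sep (xs ++ ys) = PySem.Chars.join sep xs ++ sep ++ PySem.Chars.join sep ys := by
  intro xs
  induction xs with
  | nil => intro ys h _; exact absurd rfl h
  | cons x xt ih =>
    intro ys _ hys
    cases xt with
    | nil =>
      obtain ⟨y, yt, rfl⟩ := List.exists_cons_of_ne_nil hys
      rw [List.singleton_append, PySem.Chars.join_cons_cons, PySem.Chars.join_singleton]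
    | cons x' xt' =>
      rw [List.cons_append, List.cons_append, PySem.Chars.join_cons_cons,
        ← List.cons_append, ih ys (by simp) hys, PySem.Chars.join_cons_cons]
      simp [List.append_assoc]

theorem chars_join_glue (sep : List Char) :
    ∀ (cbs : List (List (List Char))), (∀ b ∈ cbs, b ≠ []) →
      PySem.Chars.join sep (glueSep [] cbs) = PySem.Chars.join (sep ++ sep) (cbs.map (PySem.Chars.join sep)) := by
  intro cbs
  induction cbs with
  | nil => intro _; simp [glueSep]
  | cons b t ih =>
    intro h
    cases t with
    | nil => simp [glueSep, PySem.Chars.join_singleton]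
    | cons c u =>
      have hb : b ≠ [] := h b (by simp)
      have hrest : glueSep ([] : List Char) (c :: u) ≠ [] :=
        glueSep_ne_nil [] (c :: u) (by simp) (fun b hb => h b (by simp [hb]))
      obtain ⟨z, zs, hz⟩ := List.exists_cons_of_ne_nil hrest
      have hglue : glueSep ([] : List Char) (b :: c :: u)
          = b ++ ([] :: glueSep [] (c :: u)) := by simp [glueSep]
      rw [hglue, chars_join_append sep b ([] :: glueSep [] (c :: u)) hb (by simp),
        hz, PySem.Chars.join_cons_cons, ← hz]
      rw [ih (fun b hb => h b (by simp [hb]))]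
      cases u with
      | nil => simp [PySem.Chars.join_singleton, PySem.Chars.join_cons_cons, List.append_assoc]
      | cons d v => simp [PySem.Chars.join_cons_cons, List.append_assoc]

theorem str_join_glue (bs : List (List String)) (h : ∀ b ∈ bs, b ≠ []) :
    PySem.Str.join "\n" (glueSep "" bs) = PySem.Str.join "\n\n" (bs.map (PySem.Str.join "\n")) := by
  rw [← String.toList_inj, PySem.Str.toList_join, PySem.Str.toList_join]
  have hsep : "\n\n".toList = "\n".toList ++ "\n".toList := by decide
  have hnil : ("" : String).toList = [] := by decide
  rw [hsep, glueSep_map String.toList "", hnil]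
  have hmaps : (bs.map (PySem.Str.join "\n")).map String.toList
      = (bs.map (List.map String.toList)).map (PySem.Chars.join "\n".toList) := by
    simp [List.map_map, Function.comp_def, PySem.Str.toList_join]
  rw [hmaps]
  exact chars_join_glue "\n".toList (bs.map (List.map String.toList)) (by
    intro b hb
    simp only [List.mem_map] at hb
    obtain ⟨c, hc, rfl⟩ := hb
    simpa using h c hc)

-- ===== VERDICT (by name: the statement is the Claim_ definition above) =====
theorem group_roles_spec : Claim_equal_group_roles := by
  intro roles textLines _
  unfold Spec_group_roles
  simp only [group_roles, group_roles_alt]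
  rw [outerA textLines (roles.length : Int) _ (dict_fold_eq textLines) roles 0 [] (by simp)]
  simp only [inner_fold_eq, List.nil_append]
  rw [str_join_glue (roles.map (blockFor textLines)) (by
    intro b hb
    simp only [List.mem_map] at hb
    obtain ⟨r, _, rfl⟩ := hb
    simp [blockFor])]
  simp only [List.map_map, Function.comp_def, blockFor, List.singleton_append]
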